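-- pv_equiv track=rewrite | github.com/cooper30/test_tasks | Yandex/Ближайший ноль.py | nearest_zero_calculation
-- ===== SOURCE A (Python) =====
-- from typing import List, Tuple
--
-- def nearest_zero_calculation(street: List[int],
--                              street_length: int) -> List[int]:
--     result = []
--     zero_position = None
--
--     for i, value in enumerate(street):
--         if value == 0:
--             zero_position = i
--             result.append(0)
--             continue
--
--         result.append(
--             (i - zero_position) if zero_position is not None else street_length
--         )
--
--     return result
-- ===== SOURCE B (Python) =====
-- def nearest_zero_calculation(street, street_length):
--     n = len(street)
--     zeros = [i for i, v in enumerate(street) if v == 0]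
--     if not zeros:
--         return [street_length] * n
--     out = [street_length] * zeros[0]
--     for z, nxt in zip(zeros, zeros[1:] + [n]):
--         out.extend(range(nxt - z))
--     return out
-- ===== Notes on version B (the rewrite author's own statement) =====
-- stated objective: alternative
-- what changed: A does one scan carrying a last-zero-position variable and computing i - zero_position per element; B first collects the list of zero indices, then builds the output by concatenating a street_length-filled prefix and one range(gap) block per consecutive pair of zeros.
import Mathlib
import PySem

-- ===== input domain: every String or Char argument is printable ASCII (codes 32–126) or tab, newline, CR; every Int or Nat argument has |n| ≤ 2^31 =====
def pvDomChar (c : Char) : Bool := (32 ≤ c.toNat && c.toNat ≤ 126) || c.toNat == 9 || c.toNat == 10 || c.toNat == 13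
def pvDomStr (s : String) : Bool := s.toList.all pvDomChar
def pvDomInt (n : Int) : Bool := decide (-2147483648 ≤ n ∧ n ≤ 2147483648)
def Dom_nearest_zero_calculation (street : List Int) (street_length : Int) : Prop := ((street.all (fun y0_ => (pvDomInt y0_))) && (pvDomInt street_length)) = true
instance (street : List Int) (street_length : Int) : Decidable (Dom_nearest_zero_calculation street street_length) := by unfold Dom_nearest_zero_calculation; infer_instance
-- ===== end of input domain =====

-- B replaces A's single scan with a last-zero variable by indexing the zero positions
-- first and filling the output segment-by-segment (objective: alternative decomposition).

-- ===== PORT A =====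
def nearest_zero_calculation (street : List Int) (street_length : Int) : List Int :=
  ((PySem.List.enumerate street 0).foldl
    (fun (st : List Int × Option Int) (p : Int × Int) =>
      if p.2 = 0 then (st.1 ++ [(0 : Int)], some p.1)
      else (st.1 ++ [match st.2 with
                     | some z => p.1 - z
                     | none => street_length], st.2))
    ([], none)).1

-- ===== PORT B =====
def nearest_zero_calculation_alt (street : List Int) (street_length : Int) : List Int :=
  let n : Int := street.length
  let zeros : List Int :=
    (PySem.List.enumerate street 0).filterMap
      (fun p => if p.2 = 0 then some p.1 else none)
  match zeros with
  | [] => PySem.List.pyRepeat [street_length] n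
  | z :: zs =>
      ((z :: zs).zip (zs ++ [n])).foldl
        (fun out p => out ++ PySem.List.pyRange 0 (p.2 - p.1) 1)
        (PySem.List.pyRepeat [street_length] z)

-- ===== PRECONDITION & SPEC =====
def Spec_nearest_zero_calculation (street : List Int) (street_length : Int) (out : List Int) : Prop := out = nearest_zero_calculation_alt street street_length
instance (street : List Int) (street_length : Int) (out : List Int) : Decidable (Spec_nearest_zero_calculation street street_length out) := by unfold Spec_nearest_zero_calculation; infer_instance

-- ===== CLAIM (what is proved, stated in full; the proofs are below) =====
def Claim_equal_nearest_zero_calculation : Prop := ∀ (street : List Int) (street_length : Int), Dom_nearest_zero_calculation street street_length → Spec_nearest_zero_calculation street street_length (nearest_zero_calculation street street_length)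

-- ===== LEMMAS AND PROOFS =====

-- common recursive model of the output: k = current absolute index, zp = last zero seen
def nzModel (sl : Int) : Int → Option Int → List Int → List Int
  | _, _, [] => []
  | k, zp, v :: rest =>
    if v = 0 then 0 :: nzModel sl (k + 1) (some k) rest
    else (match zp with | some z => k - z | none => sl) :: nzModel sl (k + 1) zp rest

-- absolute indices of the zeros, starting at index k
def zerosFrom : Int → List Int → List Int
  | _, [] => []
  | k, v :: rest => if v = 0 then k :: zerosFrom (k + 1) rest else zerosFrom (k + 1) rest

theorem zerosFrom_ge : ∀ (street : List Int) (k x : Int), x ∈ zerosFrom k street → k ≤ x := by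
  intro street
  induction street with
  | nil => intro k x h; simp [zerosFrom] at h
  | cons v rest ih =>
    intro k x h
    simp only [zerosFrom] at h
    split at h
    · rcases List.mem_cons.mp h with h | h
      · omega
      · have := ih (k + 1) x h; omega
    · have := ih (k + 1) x h; omega

theorem cons_append_pyRange (a b : Int) (T : List Int) (h : a < b) :
    a :: (PySem.List.pyRange (a + 1) b 1 ++ T) = PySem.List.pyRange a b 1 ++ T := by
  rw [PySem.List.pyRange_one_cons h, List.cons_append]

theorem A_fold (sl : Int) : ∀ (street : List Int) (k : Int) (acc : List Int) (zp : Option Int),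
    ((PySem.List.enumerate street k).foldl
      (fun (st : List Int × Option Int) (p : Int × Int) =>
        if p.2 = 0 then (st.1 ++ [(0 : Int)], some p.1)
        else (st.1 ++ [match st.2 with
                       | some z => p.1 - z
                       | none => sl], st.2))
      (acc, zp)).1 = acc ++ nzModel sl k zp street := by
  intro street
  induction street with
  | nil => intro k acc zp; simp [PySem.List.enumerate_nil, nzModel]
  | cons v rest ih =>
    intro k acc zp
    rw [PySem.List.enumerate_cons]
    by_cases hv : v = 0
    · simp only [List.foldl_cons, hv, nzModel, ih]
      simp
    · simp only [List.foldl_cons, nzModel, if_neg hv, ih]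
      simp

theorem zeros_eq (street : List Int) : ∀ (k : Int),
    (PySem.List.enumerate street k).filterMap
      (fun p => if p.2 = 0 then some p.1 else none) = zerosFrom k street := by
  induction street with
  | nil => intro k; simp [PySem.List.enumerate_nil, zerosFrom]
  | cons v rest ih =>
    intro k
    rw [PySem.List.enumerate_cons]
    by_cases hv : v = 0
    · simp [hv, zerosFrom, ih]
    · simp [hv, zerosFrom, ih]

-- model with a zero already seen = one pyRange per zero-to-zero gap
theorem model_some (sl : Int) : ∀ (street : List Int) (k z : Int),
    nzModel sl k (some z) street =
      match zerosFrom k street with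
      | [] => PySem.List.pyRange (k - z) (k + street.length - z) 1
      | z1 :: zs =>
          PySem.List.pyRange (k - z) (z1 - z) 1 ++
            ((z1 :: zs).zip (zs ++ [k + street.length])).flatMap
              (fun p => PySem.List.pyRange 0 (p.2 - p.1) 1) := by
  intro street
  induction street with
  | nil =>
    intro k z
    simp [nzModel, zerosFrom, PySem.List.pyRange_one_eq_nil (by omega : (k : Int) + 0 - z ≤ k - z)]
  | cons v rest ih =>
    intro k z
    by_cases hv : v = 0
    · simp only [nzModel, if_pos hv, zerosFrom, ih]
      cases hz : zerosFrom (k + 1) rest with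
      | nil =>
        simp only [hz, List.nil_append, List.zip_cons_cons, List.zip_nil_left,
          List.flatMap_cons, List.flatMap_nil, List.append_nil, List.length_cons]
        rw [PySem.List.pyRange_one_eq_nil (le_refl (k - z)), List.nil_append]
        push_cast
        ring_nf
        rw [PySem.List.pyRange_one_cons (by positivity : (0 : Int) < 1 + rest.length)]
        ring_nf
      | cons z1 zs =>
        have hz1 : k + 1 ≤ z1 := zerosFrom_ge rest (k + 1) z1 (by rw [hz]; exact List.mem_cons_self)
        simp only [hz, List.zip_cons_cons, List.flatMap_cons, List.cons_append, List.length_cons]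
        rw [PySem.List.pyRange_one_eq_nil (le_refl (k - z)), List.nil_append]
        push_cast
        ring_nf
        simpa using cons_append_pyRange 0 (-k + z1) _ (by omega)
    · simp only [nzModel, if_neg hv, zerosFrom, ih]
      cases hz : zerosFrom (k + 1) rest with
      | nil =>
        simp only [hz]
        rw [show (k : Int) + 1 - z = (k - z) + 1 by ring]
        rw [← PySem.List.pyRange_one_cons (by omega)]
        congr 1
        simp only [List.length_cons]
        push_cast; ring
      | cons z1 zs =>
        have hz1 : k + 1 ≤ z1 := zerosFrom_ge rest (k + 1) z1 (by rw [hz]; exact List.mem_cons_self)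
        simp only [hz]
        rw [show (k : Int) + 1 - z = (k - z) + 1 by ring]
        rw [show (k : Int) + ↑(v :: rest).length = k + 1 + ↑rest.length by
              simp only [List.length_cons]; push_cast; ring]
        exact cons_append_pyRange (k - z) (z1 - z) _ (by omega)


-- model with no zero seen yet = replicate-prefix, then the gap pyRanges
theorem model_none (sl : Int) : ∀ (street : List Int) (k : Int),
    nzModel sl k none street =
      match zerosFrom k street with
      | [] => List.replicate street.length sl
      | z1 :: zs =>
          List.replicate (z1 - k).toNat sl ++
            ((z1 :: zs).zip (zs ++ [k + street.length])).flatMap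
              (fun p => PySem.List.pyRange 0 (p.2 - p.1) 1) := by
  intro street
  induction street with
  | nil => intro k; simp [nzModel, zerosFrom]
  | cons v rest ih =>
    intro k
    by_cases hv : v = 0
    · simp only [nzModel, if_pos hv, zerosFrom]
      rw [model_some sl rest (k + 1) k]
      cases hz : zerosFrom (k + 1) rest with
      | nil =>
        simp only [List.zip_cons_cons, List.zip_nil_left, List.flatMap_cons, List.flatMap_nil,
          List.append_nil, Int.sub_self, Int.toNat_zero, List.replicate_zero, List.nil_append,
          List.length_cons]
        push_cast
        ring_nf
        rw [PySem.List.pyRange_one_cons (by positivity : (0 : Int) < 1 + rest.length)]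
        ring_nf
      | cons z1 zs =>
        have hz1 : k + 1 ≤ z1 := zerosFrom_ge rest (k + 1) z1 (by rw [hz]; exact List.mem_cons_self)
        dsimp only
        simp only [List.cons_append, List.zip_cons_cons, List.flatMap_cons, Int.sub_self,
          Int.toNat_zero, List.replicate_zero, List.nil_append, List.length_cons]
        push_cast
        ring_nf
        simpa using cons_append_pyRange 0 (-k + z1) _ (by omega)
    · simp only [nzModel, if_neg hv, zerosFrom, ih]
      cases hz : zerosFrom (k + 1) rest with
      | nil => simp [List.replicate_succ]
      | cons z1 zs =>
        have hz1 : k + 1 ≤ z1 := zerosFrom_ge rest (k + 1) z1 (by rw [hz]; exact List.mem_cons_self)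
        dsimp only
        have : (z1 - k).toNat = (z1 - (k + 1)).toNat + 1 := by omega
        rw [this, List.replicate_succ, List.cons_append]
        congr 3
        simp only [List.length_cons]
        push_cast; ring

-- ===== VERDICT (by name: the statement is the Claim_ definition above) =====
theorem nearest_zero_calculation_spec : Claim_equal_nearest_zero_calculation := by
  intro street sl _
  unfold Spec_nearest_zero_calculation nearest_zero_calculation nearest_zero_calculation_alt
  dsimp only
  rw [A_fold sl street 0 [] none, List.nil_append, zeros_eq street 0, model_none sl street 0]
  cases hz : zerosFrom 0 street with
  | nil =>
    simp [PySem.List.pyRepeat_singleton]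
  | cons z zs =>
    have hz0 : (0 : Int) ≤ z := zerosFrom_ge street 0 z (by rw [hz]; exact List.mem_cons_self)
    dsimp only
    rw [PySem.List.foldl_append_eq_flatMap]
    simp [PySem.List.pyRepeat_singleton]
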